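-- pv_equiv track=rewrite | github.com/eliottcassidy2000/math | 03-artifacts/code/tournament_fast.py | tournament_count
-- ===== SOURCE A (Python) =====
-- from math import gcd, factorial, comb
--
-- def partitions_into_odd_parts(n, max_part=None):
--     """Generate all partitions of n into odd parts as [(size, mult), ...]."""
--     if max_part is None:
--         max_part = n
--     if max_part % 2 == 0:
--         max_part -= 1
--     if n == 0:
--         yield []
--         return
--     if max_part <= 0:
--         return
--     for count in range(n // max_part, 0, -1):
--         remainder = n - count * max_part
--         for rest in partitions_into_odd_parts(remainder, max_part - 2):
--             yield [(max_part, count)] + rest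
--     yield from partitions_into_odd_parts(n, max_part - 2)
--
-- def tournament_count(n):
--     """T(n) = number of non-isomorphic tournaments on n vertices.
--     OEIS A000568. Uses Davis/Burnside formula: O(p(n/2)) partitions.
--     Exact for any n; practical up to n~200."""
--     if n <= 1:
--         return 1
--     nfact = factorial(n)
--     total = 0
--     for partition in partitions_into_odd_parts(n):
--         t = 0
--         for size, mult in partition:
--             t += mult * (size - 1) // 2
--             t += mult * (mult - 1) // 2 * size
--         for i in range(len(partition)):
--             for j in range(i + 1, len(partition)):
--                 s1, m1 = partition[i]
--                 s2, m2 = partition[j]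
--                 t += m1 * m2 * gcd(s1, s2)
--         z = 1
--         for size, mult in partition:
--             z *= (size ** mult) * factorial(mult)
--         total += (nfact // z) * (1 << t)
--     return total // nfact
-- ===== SOURCE B (Python) =====
-- from math import gcd, factorial
--
--
-- def tournament_count(n):
--     """T(n) = number of non-isomorphic tournaments on n vertices (A000568).
--     Same Burnside/Davis formula as the original, but fused: instead of
--     materialising every partition and re-scanning it with nested index
--     loops, a single recursion threads the flat list of chosen parts and
--     accumulates the exponent t and the centralizer size z on the fly."""
--     if n <= 1:
--         return 1
--     nfact = factorial(n)
--
--     def go(rem, mp, parts, t, z):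
--         # sum of the contributions of all completions of the current choice:
--         # `parts` = flat list of parts already chosen, `t` = exponent so far
--         # (within-part plus all pairwise gcd terms), `z` = centralizer factor
--         if rem == 0:
--             return (nfact // z) << t
--         if mp <= 0:
--             return 0
--         cross = sum(gcd(mp, q) for q in parts)
--         total = 0
--         for count in range(rem // mp, 0, -1):
--             t2 = t + count * ((mp - 1) // 2 + cross) + count * (count - 1) // 2 * mp
--             z2 = z * mp ** count * factorial(count)
--             total += go(rem - count * mp, mp - 2, parts + [mp] * count, t2, z2)
--         return total + go(rem, mp - 2, parts, t, z)
--
--     m = n if n % 2 else n - 1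
--     return go(n, m, [], 0, 1) // nfact
-- ===== Notes on version B (the rewrite author's own statement) =====
-- stated objective: alternative
-- what changed: A generates all odd-part partitions as (size,mult) lists and then rescans each with three separate loops (including a nested index pair loop) to build the exponent and centralizer size; B fuses generation and summation into one recursion that threads a flat list of chosen parts and accumulates the exponent and centralizer factor incrementally, never materialising a partition list or indexing it. …
import Mathlib
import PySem

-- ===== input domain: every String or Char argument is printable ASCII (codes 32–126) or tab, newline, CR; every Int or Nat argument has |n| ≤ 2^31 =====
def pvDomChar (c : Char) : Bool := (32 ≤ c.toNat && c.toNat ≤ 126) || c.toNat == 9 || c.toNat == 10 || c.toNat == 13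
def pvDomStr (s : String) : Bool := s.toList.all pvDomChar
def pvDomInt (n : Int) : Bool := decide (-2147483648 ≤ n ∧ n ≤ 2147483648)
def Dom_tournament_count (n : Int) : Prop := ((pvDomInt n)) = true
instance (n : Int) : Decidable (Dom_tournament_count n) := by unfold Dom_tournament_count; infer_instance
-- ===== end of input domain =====

-- B is a fused single recursion over odd parts (flat part list, incremental t and z)
-- instead of A's generate-all-partitions-then-rescan with nested index loops; objective: alternative.

-- math.factorial (arguments here are always nonnegative)
def pyFact (m : Int) : Int := (Nat.factorial m.toNat : Int)

-- ===== PORT A =====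
-- partitions_into_odd_parts, materialised as a list of partitions (generator order preserved)
def partsA (n : Int) (mp : Int) : List (List (Int × Int)) :=
  let mp2 := if PySem.Int.mod mp 2 = 0 then mp - 1 else mp
  if n = 0 then [[]]
  else if mp2 ≤ 0 then []
  else
    ((PySem.List.pyRange (PySem.Int.floordiv n mp2) 0 (-1)).flatMap (fun count =>
      (partsA (n - count * mp2) (mp2 - 2)).map (fun rest => (mp2, count) :: rest)))
    ++ partsA n (mp2 - 2)
termination_by mp.toNat
decreasing_by all_goals (rename_i _ h2; simp only [mp2] at h2; split at h2 <;> split <;> omega)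

def tournament_count (n : Int) : Int :=
  if n ≤ 1 then 1
  else
    let nfact := pyFact n
    let total := (partsA n n).foldl (fun total partition =>
      let t := partition.foldl (fun t sm =>
        t + PySem.Int.floordiv (sm.2 * (sm.1 - 1)) 2
          + PySem.Int.floordiv (sm.2 * (sm.2 - 1)) 2 * sm.1) 0
      let t := (PySem.List.pyRange 0 (partition.length : Int) 1).foldl (fun t i =>
        (PySem.List.pyRange (i + 1) (partition.length : Int) 1).foldl (fun t j =>
          let sm1 := PySem.List.pyGetD partition i (0, 0)
          let sm2 := PySem.List.pyGetD partition j (0, 0)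
          t + sm1.2 * sm2.2 * (Int.gcd sm1.1 sm2.1 : Int)) t) t
      -- size ** mult with mult ≥ 1, 1 << t with t ≥ 0: exact as ^ / 2 ^ toNat here
      let z := partition.foldl (fun z sm => z * (sm.1 ^ sm.2.toNat * pyFact sm.2)) 1
      total + PySem.Int.floordiv nfact z * 2 ^ t.toNat) 0
    PySem.Int.floordiv total nfact

-- ===== PORT B =====
def goB (nfact : Int) (rem : Int) (mp : Int) (parts : List Int) (t : Int) (z : Int) : Int :=
  if rem = 0 then PySem.Int.floordiv nfact z * 2 ^ t.toNat   -- (nfact // z) << t, t ≥ 0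
  else if mp ≤ 0 then 0
  else
    let cross := parts.foldl (fun s q => s + (Int.gcd mp q : Int)) 0
    let total := (PySem.List.pyRange (PySem.Int.floordiv rem mp) 0 (-1)).foldl (fun total count =>
      let t2 := t + count * (PySem.Int.floordiv (mp - 1) 2 + cross)
                  + PySem.Int.floordiv (count * (count - 1)) 2 * mp
      let z2 := z * mp ^ count.toNat * pyFact count   -- mp ** count, count ≥ 1
      total + goB nfact (rem - count * mp) (mp - 2) (parts ++ List.replicate count.toNat mp) t2 z2) 0
    total + goB nfact rem (mp - 2) parts t z
termination_by mp.toNat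
decreasing_by all_goals omega

def tournament_count_alt (n : Int) : Int :=
  if n ≤ 1 then 1
  else
    let nfact := pyFact n
    let m := if PySem.Int.mod n 2 = 0 then n - 1 else n   -- n if n % 2 else n - 1
    PySem.Int.floordiv (goB nfact n m [] 0 1) nfact

-- ===== PRECONDITION & SPEC =====
-- Pre_ excludes n >= 1993: there A does not return — its recursive partition generator nests one
-- generator frame per two units of n, exceeds CPython's default recursion limit and raises
-- RecursionError (verified at n = 1993 and above; for astronomically large n the initial
-- factorial(n) never completes instead); B's recursion raises there likewise.
def Pre_tournament_count (n : Int) : Prop := n < 1993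
instance (n : Int) : Decidable (Pre_tournament_count n) := by unfold Pre_tournament_count; infer_instance
def pvWitness_tournament_count : Int := 6

def Spec_tournament_count (n : Int) (out : Int) : Prop := out = tournament_count_alt n
instance (n : Int) (out : Int) : Decidable (Spec_tournament_count n out) := by unfold Spec_tournament_count; infer_instance

-- ===== CLAIM (what is proved, stated in full; the proofs are below) =====
def Claim_equal_tournament_count : Prop := ∀ (n : Int), Dom_tournament_count n → Pre_tournament_count n → Spec_tournament_count n (tournament_count n)

-- ===== LEMMAS AND PROOFS =====

-- sum of gcds of p against a flat list
def crossOne (p : Int) (l : List Int) : Int := (l.map (fun q => (Int.gcd p q : Int))).sum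
-- sum of gcds between two flat lists
def cross2 (a b : List Int) : Int := (a.map (fun p => crossOne p b)).sum
-- within-part exponent contributions of a flat list
def selfS (l : List Int) : Int := (l.map (fun p => PySem.Int.floordiv (p - 1) 2)).sum
-- pairwise gcd sum inside one flat list
def pairF : List Int → Int
  | [] => 0
  | p :: l => crossOne p l + pairF l
def tFlat (l : List Int) : Int := selfS l + pairF l
-- pairwise term of A over a grouped partition
def pairG : List (Int × Int) → Int
  | [] => 0
  | x :: l => (l.map (fun y => x.2 * y.2 * (Int.gcd x.1 y.1 : Int))).sum + pairG l
-- flatten a grouped partition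
def flatP (P : List (Int × Int)) : List Int := P.flatMap (fun sm => List.replicate sm.2.toNat sm.1)
-- centralizer size of a grouped partition
def zG (P : List (Int × Int)) : Int := (P.map (fun sm => sm.1 ^ sm.2.toNat * pyFact sm.2)).prod
-- grouped within-part term of A
def tGroupS (P : List (Int × Int)) : Int :=
  (P.map (fun sm => PySem.Int.floordiv (sm.2 * (sm.1 - 1)) 2
    + PySem.Int.floordiv (sm.2 * (sm.2 - 1)) 2 * sm.1)).sum
-- invariant of partsA's output
def GoodP (P : List (Int × Int)) : Prop := ∀ sm ∈ P, 1 ≤ sm.1 ∧ sm.1 % 2 = 1 ∧ 1 ≤ sm.2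

theorem foldl_mul {α : Type} (l : List α) (g : α → Int) (a : Int) :
    l.foldl (fun z x => z * g x) a = a * (l.map g).prod := by
  induction l generalizing a with
  | nil => simp
  | cons x xs ih => simp [ih, mul_assoc]

theorem crossOne_append (p : Int) (a b : List Int) :
    crossOne p (a ++ b) = crossOne p a + crossOne p b := by
  simp [crossOne]

theorem crossOne_replicate (p q : Int) (c : Nat) :
    crossOne p (List.replicate c q) = (c : Int) * (Int.gcd p q : Int) := by
  simp [crossOne, List.map_replicate, List.sum_replicate]

theorem cross2_nil_left (b : List Int) : cross2 [] b = 0 := rfl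

theorem cross2_nil_right (a : List Int) : cross2 a [] = 0 := by
  simp [cross2, crossOne]

theorem cross2_cons_left (p : Int) (a b : List Int) :
    cross2 (p :: a) b = crossOne p b + cross2 a b := by
  simp [cross2]

theorem cross2_cons_right (a : List Int) (x : Int) (b : List Int) :
    cross2 a (x :: b) = (a.map (fun p => (Int.gcd p x : Int))).sum + cross2 a b := by
  simp only [cross2, crossOne]
  rw [← PySem.List.sum_map_add_int]
  simp

theorem cross2_append_left (a b c : List Int) :
    cross2 (a ++ b) c = cross2 a c + cross2 b c := by
  simp [cross2]

theorem cross2_append_right (a b c : List Int) :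
    cross2 a (b ++ c) = cross2 a b + cross2 a c := by
  simp only [cross2]
  rw [← PySem.List.sum_map_add_int]
  apply congrArg
  apply List.map_congr_left
  intro p _
  exact crossOne_append p b c

theorem cross2_comm (a b : List Int) : cross2 a b = cross2 b a := by
  induction a with
  | nil => simp [cross2_nil_left, cross2_nil_right]
  | cons p a ih =>
    rw [cross2_cons_left, cross2_cons_right, ih]
    congr 1
    simp only [crossOne]
    apply congrArg
    apply List.map_congr_left
    intro q _
    rw [Int.gcd_comm]

theorem cross2_replicate_left (p : Int) (c : Nat) (b : List Int) :
    cross2 (List.replicate c p) b = (c : Int) * crossOne p b := by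
  simp [cross2, List.map_replicate, List.sum_replicate]

theorem selfS_append (a b : List Int) : selfS (a ++ b) = selfS a + selfS b := by
  simp [selfS]

theorem selfS_replicate (p : Int) (c : Nat) :
    selfS (List.replicate c p) = (c : Int) * PySem.Int.floordiv (p - 1) 2 := by
  simp [selfS, List.map_replicate, List.sum_replicate]

theorem pairF_append (a b : List Int) :
    pairF (a ++ b) = pairF a + cross2 a b + pairF b := by
  induction a with
  | nil => simp [pairF, cross2_nil_left]
  | cons p a ih =>
    simp only [List.cons_append, pairF, ih, crossOne_append, cross2_cons_left]
    ring

theorem pairF_replicate (p : Int) (hp : 0 ≤ p) (c : Nat) :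
    pairF (List.replicate c p) = PySem.Int.floordiv ((c : Int) * ((c : Int) - 1)) 2 * p := by
  induction c with
  | zero =>
    simp only [Nat.cast_zero, List.replicate_zero, pairF]
    rw [PySem.Int.floordiv_eq_ediv_of_pos (by norm_num)]
    norm_num
  | succ c ih =>
    rw [List.replicate_succ, pairF, ih, crossOne_replicate, Int.gcd_self,
      Int.natAbs_of_nonneg hp]
    rw [PySem.Int.floordiv_eq_ediv_of_pos (by omega), PySem.Int.floordiv_eq_ediv_of_pos (by omega)]
    have h2 : (2:Int) ∣ (c : Int) * ((c : Int) - 1) := by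
      rcases Int.even_or_odd (c : Int) with h | h
      · exact Dvd.dvd.mul_right h.two_dvd _
      · obtain ⟨k, hk⟩ := h
        exact Dvd.dvd.mul_left ⟨k, by omega⟩ _
    obtain ⟨d, hd⟩ := h2
    have h3 : ((c : Nat) + 1 : Int) * ((c : Nat) + 1 - 1) = 2 * (d + c) := by push_cast; nlinarith [hd]
    have h4 : ((c : Nat) : Int) * ((c : Nat) - 1) = 2 * d := hd
    push_cast at h3 h4 ⊢
    rw [h3, h4, Int.mul_ediv_cancel_left _ (by norm_num), Int.mul_ediv_cancel_left _ (by norm_num)]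
    ring

-- the flat-list cross sum against a grouped partition, grouped form
theorem crossOne_flatP (p : Int) (P : List (Int × Int)) (hP : ∀ sm ∈ P, 0 ≤ sm.2) :
    crossOne p (flatP P) = (P.map (fun y => y.2 * (Int.gcd p y.1 : Int))).sum := by
  induction P with
  | nil => rfl
  | cons x xs ih =>
    have hx : 0 ≤ x.2 := hP x (by simp)
    simp only [flatP, List.flatMap_cons] at *
    rw [crossOne_append, crossOne_replicate, ih (fun sm h => hP sm (by simp [h]))]
    simp [Int.toNat_of_nonneg hx]

-- ===== the B-side characterisation =====

theorem goB_unfold (nfact rem mp : Int) (parts : List Int) (t z : Int) :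
    goB nfact rem mp parts t z =
      if rem = 0 then PySem.Int.floordiv nfact z * 2 ^ t.toNat
      else if mp ≤ 0 then 0
      else
        (PySem.List.pyRange (PySem.Int.floordiv rem mp) 0 (-1)).foldl (fun total count =>
          total + goB nfact (rem - count * mp) (mp - 2)
            (parts ++ List.replicate count.toNat mp)
            (t + count * (PySem.Int.floordiv (mp - 1) 2
                 + parts.foldl (fun s q => s + (Int.gcd mp q : Int)) 0)
               + PySem.Int.floordiv (count * (count - 1)) 2 * mp)
            (z * mp ^ count.toNat * pyFact count)) 0
        + goB nfact rem (mp - 2) parts t z := by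
  rw [goB]

def contribF (nfact z t : Int) (parts : List Int) (P : List (Int × Int)) : Int :=
  PySem.Int.floordiv nfact (z * zG P) *
    2 ^ (t + tFlat (flatP P) + cross2 (flatP P) parts).toNat

theorem partsA_unfold_odd (n mp : Int) (hodd : mp % 2 = 1) :
    partsA n mp =
      if n = 0 then [[]]
      else if mp ≤ 0 then []
      else
        ((PySem.List.pyRange (PySem.Int.floordiv n mp) 0 (-1)).flatMap (fun count =>
          (partsA (n - count * mp) (mp - 2)).map (fun rest => (mp, count) :: rest)))
        ++ partsA n (mp - 2) := by
  rw [partsA]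
  have h : ¬ PySem.Int.mod mp 2 = 0 := by
    rw [PySem.Int.mod_eq_emod_of_pos (by norm_num)]; omega
  simp only [h, if_false]

theorem goB_eq (nfact : Int) (k : Nat) : ∀ (mp : Int), mp.toNat ≤ k → mp % 2 = 1 →
    ∀ (rem : Int) (parts : List Int) (t z : Int),
    goB nfact rem mp parts t z = ((partsA rem mp).map (contribF nfact z t parts)).sum := by
  induction k with
  | zero =>
    intro mp hk hodd rem parts t z
    have hmp : mp ≤ 0 := by omega
    rw [goB_unfold, partsA_unfold_odd _ _ hodd]
    by_cases hrem : rem = 0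
    · simp only [hrem, if_true, List.map_cons, List.map_nil, List.sum_cons, List.sum_nil,
        contribF]
      simp [zG, flatP, tFlat, selfS, pairF, cross2_nil_left]
    · simp [hrem, hmp]
  | succ k ih =>
    intro mp hk hodd rem parts t z
    rw [goB_unfold, partsA_unfold_odd _ _ hodd]
    by_cases hrem : rem = 0
    · simp only [hrem, if_true, List.map_cons, List.map_nil, List.sum_cons, List.sum_nil,
        contribF]
      simp [zG, flatP, tFlat, selfS, pairF, cross2_nil_left]
    by_cases hmp : mp ≤ 0
    · simp [hrem, hmp]
    simp only [hrem, hmp, if_false]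
    have hodd2 : (mp - 2) % 2 = 1 := by omega
    have hk2 : (mp - 2).toNat ≤ k := by omega
    rw [ih (mp - 2) hk2 hodd2 rem parts t z]
    rw [List.map_append, List.sum_append]
    congr 1
    -- the counted branch
    rw [PySem.List.foldl_add (g := fun count => goB nfact (rem - count * mp) (mp - 2)
      (parts ++ List.replicate count.toNat mp)
      (t + count * (PySem.Int.floordiv (mp - 1) 2
           + parts.foldl (fun s q => s + (Int.gcd mp q : Int)) 0)
         + PySem.Int.floordiv (count * (count - 1)) 2 * mp)
      (z * mp ^ count.toNat * pyFact count))]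
    rw [zero_add, List.map_flatMap, List.flatMap_def, List.sum_flatten, List.map_map]
    apply congrArg
    apply List.map_congr_left
    intro count hcount
    have hc1 : 1 ≤ count := (PySem.List.mem_pyRange_neg_one.mp hcount).1
    simp only [Function.comp_apply]
    rw [ih (mp - 2) hk2 hodd2 (rem - count * mp) (parts ++ List.replicate count.toNat mp) _ _,
      List.map_map]
    apply congrArg
    apply List.map_congr_left
    intro P _
    have hcross : parts.foldl (fun s q => s + (Int.gcd mp q : Int)) 0 = crossOne mp parts := by
      rw [PySem.List.foldl_add]
      simp [crossOne]
    have hc0 : 0 ≤ count := by omega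
    have hcc : ((count.toNat : Nat) : Int) = count := Int.toNat_of_nonneg hc0
    rw [hcross]
    simp only [Function.comp, contribF]
    have hflat : flatP ((mp, count) :: P) = List.replicate count.toNat mp ++ flatP P := by
      simp [flatP]
    have hzg : zG ((mp, count) :: P) = mp ^ count.toNat * pyFact count * zG P := by
      simp only [zG, List.map_cons, List.prod_cons]
    rw [hflat, hzg]
    congr 1
    · congr 1
      ring
    · congr 1
      simp only [tFlat, selfS_append, pairF_append, cross2_append_left, cross2_append_right,
        cross2_comm (flatP P) (List.replicate count.toNat mp), cross2_replicate_left,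
        selfS_replicate, pairF_replicate mp (by omega)]
      rw [hcc]
      ring

-- ===== the A-side characterisation =====

-- the index pair loop over a suffix, as a structural sum
theorem rangeSum_pairG (l : List (Int × Int)) :
    ((List.range l.length).map (fun k =>
      ((l.drop (k + 1)).map (fun y => (l.getD k (0, 0)).2 * y.2 *
        (Int.gcd (l.getD k (0, 0)).1 y.1 : Int))).sum)).sum = pairG l := by
  induction l with
  | nil => rfl
  | cons x xs ih =>
    rw [List.length_cons, List.range_succ_eq_map, List.map_cons, List.sum_cons, List.map_map]
    simp only [List.getD_cons_zero, List.drop_succ_cons, List.drop_zero, pairG]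
    congr 1

theorem pairLoop_eq (l : List (Int × Int)) (t0 : Int) :
    (PySem.List.pyRange 0 (l.length : Int) 1).foldl (fun t i =>
      (PySem.List.pyRange (i + 1) (l.length : Int) 1).foldl (fun t j =>
        t + (PySem.List.pyGetD l i (0, 0)).2 * (PySem.List.pyGetD l j (0, 0)).2 *
          (Int.gcd (PySem.List.pyGetD l i (0, 0)).1 (PySem.List.pyGetD l j (0, 0)).1 : Int)) t) t0
    = t0 + pairG l := by
  have hstep : ∀ t (i : Int), 0 ≤ i →
      (PySem.List.pyRange (i + 1) (l.length : Int) 1).foldl (fun t j =>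
        t + (PySem.List.pyGetD l i (0, 0)).2 * (PySem.List.pyGetD l j (0, 0)).2 *
          (Int.gcd (PySem.List.pyGetD l i (0, 0)).1 (PySem.List.pyGetD l j (0, 0)).1 : Int)) t
      = t + ((l.drop (i + 1).toNat).map (fun y => (PySem.List.pyGetD l i (0, 0)).2 * y.2 *
          (Int.gcd (PySem.List.pyGetD l i (0, 0)).1 y.1 : Int))).sum := by
    intro t i hi
    rw [PySem.List.foldl_pyRange_pyGetD' l (0, 0)
      (fun t y => t + (PySem.List.pyGetD l i (0, 0)).2 * y.2 *
        (Int.gcd (PySem.List.pyGetD l i (0, 0)).1 y.1 : Int)) t (by omega)]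
    rw [PySem.List.foldl_add]
  rw [PySem.List.foldl_congr_mem' (PySem.List.pyRange 0 (l.length : Int) 1)
    (fun t i =>
      (PySem.List.pyRange (i + 1) (l.length : Int) 1).foldl (fun t j =>
        t + (PySem.List.pyGetD l i (0, 0)).2 * (PySem.List.pyGetD l j (0, 0)).2 *
          (Int.gcd (PySem.List.pyGetD l i (0, 0)).1 (PySem.List.pyGetD l j (0, 0)).1 : Int)) t)
    (fun t i =>
      t + ((l.drop (i + 1).toNat).map (fun y => (PySem.List.pyGetD l i (0, 0)).2 * y.2 *
        (Int.gcd (PySem.List.pyGetD l i (0, 0)).1 y.1 : Int))).sum)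
    t0
    (by intro i hi t
        exact hstep t i (PySem.List.mem_pyRange_one.mp hi).1)]
  rw [PySem.List.foldl_add, PySem.List.pyRange_one]
  simp only [sub_zero, Int.toNat_natCast, List.map_map]
  apply congrArg
  rw [← rangeSum_pairG l]
  apply congrArg
  apply List.map_congr_left
  intro k hk
  simp only [Function.comp_apply, zero_add, PySem.List.pyGetD_natCast]
  have h1 : ((k : Int) + 1).toNat = k + 1 := by omega
  rw [h1]

-- every partition produced by partsA has odd positive sizes and positive multiplicities
theorem partsA_inv (k : Nat) : ∀ (mp : Int), mp.toNat ≤ k → ∀ (n : Int) (P : List (Int × Int)),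
    P ∈ partsA n mp → GoodP P := by
  induction k with
  | zero =>
    intro mp hk n P hP sm hsm
    rw [partsA] at hP
    have h0 : (if PySem.Int.mod mp 2 = 0 then mp - 1 else mp) ≤ 0 := by
      rw [PySem.Int.mod_eq_emod_of_pos (by norm_num)]
      split <;> omega
    by_cases hn : n = 0
    · simp only [hn, if_true] at hP
      simp at hP
      subst hP
      simp at hsm
    · rw [if_neg hn, if_pos h0] at hP
      simp at hP
  | succ k ih =>
    intro mp hk n P hP sm hsm
    rw [partsA] at hP
    set mp2 := if PySem.Int.mod mp 2 = 0 then mp - 1 else mp with hmp2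
    have hmod : PySem.Int.mod mp 2 = mp % 2 := PySem.Int.mod_eq_emod_of_pos (by norm_num)
    by_cases hn : n = 0
    · simp only [hn, if_true] at hP
      simp at hP
      subst hP
      simp at hsm
    by_cases h0 : mp2 ≤ 0
    · rw [if_neg hn, if_pos h0] at hP
      simp at hP
    rw [if_neg hn, if_neg h0] at hP
    rw [List.mem_append] at hP
    have hk2 : (mp2 - 2).toNat ≤ k := by
      rw [hmp2] at h0 ⊢
      split at h0 <;> (split <;> omega)
    rcases hP with hP | hP
    · rw [List.mem_flatMap] at hP
      obtain ⟨count, hcount, hP⟩ := hP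
      rw [List.mem_map] at hP
      obtain ⟨rest, hrest, hPeq⟩ := hP
      subst hPeq
      rcases List.mem_cons.mp hsm with hsm | hsm
      · subst hsm
        refine ⟨by omega, ?_, (PySem.List.mem_pyRange_neg_one.mp hcount).1⟩
        rw [hmp2, hmod]
        rw [hmp2, hmod] at h0
        split <;> omega
      · exact ih (mp2 - 2) hk2 _ rest hrest sm hsm
    · exact ih (mp2 - 2) hk2 _ P hP sm hsm

-- grouped within-part terms plus grouped pairwise terms = flat exponent
theorem tGroup_flat (P : List (Int × Int)) (hP : GoodP P) :
    tGroupS P + pairG P = tFlat (flatP P) := by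
  induction P with
  | nil => rfl
  | cons x xs ih =>
    obtain ⟨hs1, hs2, hm⟩ := hP x (by simp)
    have hxs : GoodP xs := fun sm h => hP sm (by simp [h])
    have hflat : flatP (x :: xs) = List.replicate x.2.toNat x.1 ++ flatP xs := by
      simp [flatP]
    have hcc : ((x.2.toNat : Nat) : Int) = x.2 := Int.toNat_of_nonneg (by omega)
    have ihu : tGroupS xs + pairG xs = selfS (flatP xs) + pairF (flatP xs) := by
      have h := ih hxs
      simpa only [tFlat] using h
    rw [hflat]
    simp only [tGroupS, List.map_cons, List.sum_cons, pairG, tFlat, selfS_append, pairF_append,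
      cross2_replicate_left, selfS_replicate, pairF_replicate x.1 (by omega), hcc]
    have e1 : PySem.Int.floordiv (x.2 * (x.1 - 1)) 2 = x.2 * PySem.Int.floordiv (x.1 - 1) 2 := by
      rw [PySem.Int.floordiv_eq_ediv_of_pos (by norm_num),
        PySem.Int.floordiv_eq_ediv_of_pos (by norm_num)]
      exact Int.mul_ediv_assoc x.2 (by omega)
    have e2 : PySem.Int.floordiv (x.2 * (x.2 - 1)) 2 =
        PySem.Int.floordiv (((x.2.toNat : Nat) : Int) * (((x.2.toNat : Nat) : Int) - 1)) 2 := by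
      rw [hcc]
    have e3 : crossOne x.1 (flatP xs) = (xs.map (fun y => y.2 * (Int.gcd x.1 y.1 : Int))).sum :=
      crossOne_flatP x.1 xs (fun sm h => by have := hxs sm h; omega)
    have e4 : (xs.map (fun y => x.2 * y.2 * (Int.gcd x.1 y.1 : Int))).sum
        = x.2 * crossOne x.1 (flatP xs) := by
      rw [e3, ← List.sum_map_mul_left]
      apply congrArg
      apply List.map_congr_left
      intro y _
      ring
    rw [e1, e2, e4]
    simp only [hcc]
    rw [← tGroupS]
    linear_combination ihu

-- normalisation step of partsA for an even bound
theorem partsA_norm (n mp : Int) (h : PySem.Int.mod mp 2 = 0) :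
    partsA n mp = partsA n (mp - 1) := by
  have hodd : (mp - 1) % 2 = 1 := by
    rw [PySem.Int.mod_eq_emod_of_pos (by norm_num)] at h
    omega
  rw [partsA_unfold_odd _ _ hodd, partsA]
  simp only [h, if_true]



theorem tournament_count_agree (n : Int) : tournament_count n = tournament_count_alt n := by
  by_cases h : n ≤ 1
  · simp [tournament_count, tournament_count_alt, h]
  · simp only [tournament_count, tournament_count_alt, if_neg h]
    set m := if PySem.Int.mod n 2 = 0 then n - 1 else n with hm
    have hmod : PySem.Int.mod n 2 = n % 2 := PySem.Int.mod_eq_emod_of_pos (by norm_num)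
    have hmodd : m % 2 = 1 := by
      rw [hm, hmod]
      split <;> omega
    have hA : partsA n n = partsA n m := by
      rw [hm]
      split
      · exact partsA_norm n n ‹_›
      · rfl
    have hkm : m.toNat ≤ n.toNat := by
      rw [hm]
      split <;> omega
    rw [goB_eq (pyFact n) n.toNat m hkm hmodd n [] 0 1]
    congr 1
    rw [PySem.List.foldl_add (g := fun partition : List (Int × Int) =>
      PySem.Int.floordiv (pyFact n)
        (partition.foldl (fun z sm => z * (sm.1 ^ sm.2.toNat * pyFact sm.2)) 1) *
      2 ^ ((PySem.List.pyRange 0 (partition.length : Int) 1).foldl (fun t i =>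
        (PySem.List.pyRange (i + 1) (partition.length : Int) 1).foldl (fun t j =>
          t + (PySem.List.pyGetD partition i (0, 0)).2 * (PySem.List.pyGetD partition j (0, 0)).2 *
            (Int.gcd (PySem.List.pyGetD partition i (0, 0)).1
              (PySem.List.pyGetD partition j (0, 0)).1 : Int)) t)
        (partition.foldl (fun t sm =>
          t + PySem.Int.floordiv (sm.2 * (sm.1 - 1)) 2
            + PySem.Int.floordiv (sm.2 * (sm.2 - 1)) 2 * sm.1) 0)).toNat)]
    rw [zero_add, hA]
    apply congrArg
    apply List.map_congr_left
    intro P hP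
    have hGood : GoodP P := partsA_inv n.toNat m hkm n P hP
    have hz : P.foldl (fun z sm => z * (sm.1 ^ sm.2.toNat * pyFact sm.2)) 1 = zG P := by
      rw [foldl_mul]
      simp [zG]
    have htg : P.foldl (fun t sm =>
        t + PySem.Int.floordiv (sm.2 * (sm.1 - 1)) 2
          + PySem.Int.floordiv (sm.2 * (sm.2 - 1)) 2 * sm.1) 0 = tGroupS P := by
      have hfun : (fun (t : Int) (sm : Int × Int) =>
          t + PySem.Int.floordiv (sm.2 * (sm.1 - 1)) 2
            + PySem.Int.floordiv (sm.2 * (sm.2 - 1)) 2 * sm.1)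
          = (fun (t : Int) (sm : Int × Int) =>
          t + (PySem.Int.floordiv (sm.2 * (sm.1 - 1)) 2
            + PySem.Int.floordiv (sm.2 * (sm.2 - 1)) 2 * sm.1)) := by
        funext t sm
        ring
      rw [hfun, PySem.List.foldl_add, zero_add, tGroupS]
    rw [pairLoop_eq P, htg, hz, tGroup_flat P hGood, contribF]
    rw [cross2_nil_right, one_mul, zero_add, add_zero]

-- ===== VERDICT (by name: the statement is the Claim_ definition above) =====
theorem tournament_count_spec : Claim_equal_tournament_count := by
  intro n _ _
  unfold Spec_tournament_count
  exact tournament_count_agree n
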